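-- pv_equiv track=rewrite | github.com/guncv/Python | 07_StrFile/07_StrFile_★★★_Password_Strength .py | letter_sequence
-- ===== SOURCE A (Python) =====
-- import string
--
-- def letter_sequence(t) :
--     letter = string.ascii_lowercase
--     x = letter[::-1]
--     t = t.lower()
--     for i in range(len(t)-3) :
--         if t[i:i+4] in letter or t[i:i+4] in x :
--             return True
--     return False
-- ===== SOURCE B (Python) =====
-- def letter_sequence(t):
--     t = t.lower()
--     asc = desc = 1
--     for i in range(1, len(t)):
--         prev, cur = t[i - 1], t[i]
--         both = 'a' <= prev <= 'z' and 'a' <= cur <= 'z'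
--         asc = asc + 1 if both and ord(cur) - ord(prev) == 1 else 1
--         desc = desc + 1 if both and ord(prev) - ord(cur) == 1 else 1
--         if asc >= 4 or desc >= 4:
--             return True
--     return False
-- ===== Notes on version B (the rewrite author's own statement) =====
-- stated objective: faster
-- what changed: Replaced the per-position 4-character substring-membership tests against the alphabet and its reverse by a single streaming pass that keeps ascending/descending consecutive-letter run lengths and returns as soon as a run reaches 4.
import Mathlib
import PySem

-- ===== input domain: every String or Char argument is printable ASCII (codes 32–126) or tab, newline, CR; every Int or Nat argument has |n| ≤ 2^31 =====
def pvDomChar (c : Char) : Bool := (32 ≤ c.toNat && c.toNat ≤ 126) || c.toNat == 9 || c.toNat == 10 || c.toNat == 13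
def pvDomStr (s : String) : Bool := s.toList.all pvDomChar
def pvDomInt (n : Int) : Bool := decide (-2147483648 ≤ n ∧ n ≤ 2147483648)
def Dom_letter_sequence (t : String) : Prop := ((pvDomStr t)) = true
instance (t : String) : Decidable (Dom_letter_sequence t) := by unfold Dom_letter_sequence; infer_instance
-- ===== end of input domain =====

-- B replaces A's per-window substring tests against the alphabet and its reverse by one
-- streaming pass keeping ascending/descending consecutive-letter run lengths (objective: faster).

-- ===== PORT A =====
def letter_sequence (t : String) : Bool :=
  let letter : List Char := "abcdefghijklmnopqrstuvwxyz".toList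
  let x : List Char := (PySem.List.slice? letter none none (-1)).getD []
  let tl : List Char := PySem.Chars.lower t.toList
  (PySem.List.pyRange 0 ((tl.length : Int) - 3) 1).foldl
    (fun found i =>
      if PySem.Chars.isIn (PySem.List.slice tl (some i) (some (i + 4))) letter
          || PySem.Chars.isIn (PySem.List.slice tl (some i) (some (i + 4))) x
      then true else found)
    false

-- ===== PORT B =====
def letter_sequence_alt (t : String) : Bool :=
  let tl : List Char := PySem.Chars.lower t.toList
  let r := (PySem.List.pyRange 1 (tl.length : Int) 1).foldl
    (fun s i =>
      if s.1 then s
      else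
        let prev := PySem.List.pyGetD tl (i - 1) ' '
        let cur := PySem.List.pyGetD tl i ' '
        let both := ('a' ≤ prev && prev ≤ 'z') && ('a' ≤ cur && cur ≤ 'z')
        let asc := if both && (cur.toNat == prev.toNat + 1) then s.2.1 + 1 else 1
        let desc := if both && (prev.toNat == cur.toNat + 1) then s.2.2 + 1 else 1
        (decide (4 ≤ asc) || decide (4 ≤ desc), asc, desc))
    (false, (1 : Nat), (1 : Nat))
  r.1

-- ===== PRECONDITION & SPEC =====
def Spec_letter_sequence (t : String) (out : Bool) : Prop := out = letter_sequence_alt t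
instance (t : String) (out : Bool) : Decidable (Spec_letter_sequence t out) := by unfold Spec_letter_sequence; infer_instance

-- ===== CLAIM (what is proved, stated in full; the proofs are below) =====
def Claim_equal_letter_sequence : Prop := ∀ (t : String), Dom_letter_sequence t → Spec_letter_sequence t (letter_sequence t)

-- ===== LEMMAS AND PROOFS =====

-- the lowercase alphabet, and the Bool "b is the letter right after the letter a" step test
def pvAlpha : List Char := "abcdefghijklmnopqrstuvwxyz".toList

def pvStep (a b : Char) : Bool :=
  (('a' ≤ a && a ≤ 'z') && ('a' ≤ b && b ≤ 'z')) && (b.toNat == a.toNat + 1)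

def pvG (l : List Char) (k : Nat) : Char := l.getD k ' '

def pvAsc (l : List Char) (i : Nat) : Bool :=
  pvStep (pvG l i) (pvG l (i+1)) && pvStep (pvG l (i+1)) (pvG l (i+2)) && pvStep (pvG l (i+2)) (pvG l (i+3))

def pvDesc (l : List Char) (i : Nat) : Bool :=
  pvStep (pvG l (i+1)) (pvG l i) && pvStep (pvG l (i+2)) (pvG l (i+1)) && pvStep (pvG l (i+3)) (pvG l (i+2))

-- ascending/descending consecutive-letter run length ending at position m
def pvAr (l : List Char) : Nat → Nat
  | 0 => 1
  | m+1 => if pvStep (pvG l m) (pvG l (m+1)) then pvAr l m + 1 else 1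

def pvDr (l : List Char) : Nat → Nat
  | 0 => 1
  | m+1 => if pvStep (pvG l (m+1)) (pvG l m) then pvDr l m + 1 else 1

-- B's loop body on Nat indices, and the fold over positions 1..m
def pvB (l : List Char) (s : Bool × Nat × Nat) (k : Nat) : Bool × Nat × Nat :=
  if s.1 then s
  else
    let prev := pvG l (k - 1)
    let cur := pvG l k
    let both := ('a' ≤ prev && prev ≤ 'z') && ('a' ≤ cur && cur ≤ 'z')
    let asc := if both && (cur.toNat == prev.toNat + 1) then s.2.1 + 1 else 1
    let desc := if both && (prev.toNat == cur.toNat + 1) then s.2.2 + 1 else 1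
    (decide (4 ≤ asc) || decide (4 ≤ desc), asc, desc)

def pvGo (l : List Char) (m : Nat) : Bool × Nat × Nat :=
  (List.range' 1 m).foldl (pvB l) (false, 1, 1)

lemma pv_le97 (c : Char) : ('a' ≤ c) ↔ 97 ≤ c.toNat := by
  rw [Char.le_def, UInt32.le_iff_toNat_le]
  exact Iff.rfl

lemma pv_le122 (c : Char) : (c ≤ 'z') ↔ c.toNat ≤ 122 := by
  rw [Char.le_def, UInt32.le_iff_toNat_le]
  exact Iff.rfl

lemma pv_char_eq {c d : Char} (h : c.toNat = d.toNat) : c = d := by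
  have : c.val = d.val := by
    have h' := h
    simp only [Char.toNat] at h'
    exact UInt32.toNat_inj.mp h'
  exact Char.ext this

lemma pvStep_iff (a b : Char) : pvStep a b = true ↔
    (97 ≤ a.toNat ∧ a.toNat ≤ 122 ∧ 97 ≤ b.toNat ∧ b.toNat ≤ 122 ∧ b.toNat = a.toNat + 1) := by
  unfold pvStep
  simp only [Bool.and_eq_true, decide_eq_true_eq, beq_iff_eq, pv_le97, pv_le122]
  tauto

lemma pvStep_swap (a b : Char) :
    ((('a' ≤ a && a ≤ 'z') && ('a' ≤ b && b ≤ 'z')) && (a.toNat == b.toNat + 1)) = pvStep b a := by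
  unfold pvStep
  rw [Bool.and_comm ('a' ≤ a && a ≤ 'z') ('a' ≤ b && b ≤ 'z')]

-- a window that matches must lie entirely inside the string (the ' ' default is not a letter)
lemma pv_win_bound {l : List Char} {i : Nat} (h : (pvAsc l i || pvDesc l i) = true) :
    i + 4 ≤ l.length := by
  by_contra hc
  push_neg at hc
  have hsp : pvG l (i+3) = ' ' := by
    unfold pvG; exact List.getD_eq_default _ _ (by omega)
  have h32 : (' ').toNat = 32 := rfl
  rw [Bool.or_eq_true] at h
  rcases h with h1 | h1
  · unfold pvAsc at h1
    rw [Bool.and_eq_true] at h1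
    have h2 := (pvStep_iff _ _).mp h1.2
    rw [hsp] at h2
    omega
  · unfold pvDesc at h1
    rw [Bool.and_eq_true] at h1
    have h2 := (pvStep_iff _ _).mp h1.2
    rw [hsp] at h2
    omega

-- the two substring tests on a 4-character window
lemma pv_isIn_alpha {w : List Char} (hw : w.length = 4) :
    PySem.Chars.isIn w pvAlpha = true ↔ pvAsc w 0 = true := by
  rw [PySem.Chars.isIn_iff_infix]
  have hA26 : pvAlpha.length = 26 := by decide
  constructor
  · rintro ⟨s, u, hsu⟩
    have hlenh := congrArg List.length hsu
    simp only [List.length_append, hw, hA26] at hlenh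
    have hdrop : pvAlpha.drop s.length = w ++ u := by
      rw [← hsu, List.append_assoc, List.drop_left]
    have hweq : w = (pvAlpha.drop s.length).take 4 := by
      rw [hdrop, List.take_left' hw]
    have hall : ∀ k : Fin 23, pvAsc ((pvAlpha.drop k.1).take 4) 0 = true := by decide
    rw [hweq]
    exact hall ⟨s.length, by omega⟩
  · intro h
    obtain ⟨a, b, c, d, rfl⟩ : ∃ a b c d, w = [a, b, c, d] := by
      match w, hw with
      | [a, b, c, d], _ => exact ⟨a, b, c, d, rfl⟩
    unfold pvAsc at h
    rw [Bool.and_eq_true] at h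
    obtain ⟨h01, h2⟩ := h
    rw [Bool.and_eq_true] at h01
    obtain ⟨h0, h1⟩ := h01
    have g0 : pvG [a, b, c, d] 0 = a := rfl
    have g1 : pvG [a, b, c, d] (0+1) = b := rfl
    have g2 : pvG [a, b, c, d] (0+2) = c := rfl
    have g3 : pvG [a, b, c, d] (0+3) = d := rfl
    rw [g0, g1] at h0
    rw [g1, g2] at h1
    rw [g2, g3] at h2
    rw [pvStep_iff] at h0 h1 h2
    set k := a.toNat - 97 with hkdef
    have hweq : [a, b, c, d] = (pvAlpha.drop k).take 4 := by
      have hchar : ∀ m : Fin 26, (pvAlpha.getD m.1 ' ').toNat = 97 + m.1 := by decide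
      apply List.ext_getElem
      · simp only [List.length_take, List.length_drop, hA26]
        simp only [List.length_cons, List.length_nil]
        omega
      · intro j hj1 hj2
        have hj4 : j < 4 := by simpa using hj1
        have hkj : k + j < 26 := by omega
        have hrhs : ((pvAlpha.drop k).take 4)[j] = pvAlpha[k + j]'(by omega) := by
          rw [List.getElem_take, List.getElem_drop]
        have hval : (pvAlpha[k + j]'(by omega)).toNat = 97 + (k + j) := by
          have h1' := hchar ⟨k + j, hkj⟩
          rwa [List.getD_eq_getElem _ _ (by omega)] at h1'
        apply pv_char_eq
        rw [hrhs, hval]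
        interval_cases j <;> simp <;> omega
    have hinf : ∀ m : Fin 23, ((pvAlpha.drop m.1).take 4) <:+: pvAlpha := by decide
    rw [hweq]
    exact hinf ⟨k, by omega⟩

lemma pv_isIn_alphaRev {w : List Char} (hw : w.length = 4) :
    PySem.Chars.isIn w pvAlpha.reverse = true ↔ pvDesc w 0 = true := by
  rw [PySem.Chars.isIn_iff_infix]
  have hA26 : pvAlpha.reverse.length = 26 := by decide
  constructor
  · rintro ⟨s, u, hsu⟩
    have hlenh := congrArg List.length hsu
    simp only [List.length_append, hw, hA26] at hlenh
    have hdrop : pvAlpha.reverse.drop s.length = w ++ u := by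
      rw [← hsu, List.append_assoc, List.drop_left]
    have hweq : w = (pvAlpha.reverse.drop s.length).take 4 := by
      rw [hdrop, List.take_left' hw]
    have hall : ∀ k : Fin 23, pvDesc ((pvAlpha.reverse.drop k.1).take 4) 0 = true := by decide
    rw [hweq]
    exact hall ⟨s.length, by omega⟩
  · intro h
    obtain ⟨a, b, c, d, rfl⟩ : ∃ a b c d, w = [a, b, c, d] := by
      match w, hw with
      | [a, b, c, d], _ => exact ⟨a, b, c, d, rfl⟩
    unfold pvDesc at h
    rw [Bool.and_eq_true] at h
    obtain ⟨h01, h2⟩ := h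
    rw [Bool.and_eq_true] at h01
    obtain ⟨h0, h1⟩ := h01
    have g0 : pvG [a, b, c, d] 0 = a := rfl
    have g1 : pvG [a, b, c, d] (0+1) = b := rfl
    have g2 : pvG [a, b, c, d] (0+2) = c := rfl
    have g3 : pvG [a, b, c, d] (0+3) = d := rfl
    rw [g1, g0] at h0
    rw [g2, g1] at h1
    rw [g3, g2] at h2
    rw [pvStep_iff] at h0 h1 h2
    set k := 122 - a.toNat with hkdef
    have hweq : [a, b, c, d] = (pvAlpha.reverse.drop k).take 4 := by
      have hchar : ∀ m : Fin 26, (pvAlpha.reverse.getD m.1 ' ').toNat = 122 - m.1 := by decide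
      apply List.ext_getElem
      · simp only [List.length_take, List.length_drop, hA26]
        simp only [List.length_cons, List.length_nil]
        omega
      · intro j hj1 hj2
        have hj4 : j < 4 := by simpa using hj1
        have hkj : k + j < 26 := by omega
        have hrhs : ((pvAlpha.reverse.drop k).take 4)[j] = pvAlpha.reverse[k + j]'(by omega) := by
          rw [List.getElem_take, List.getElem_drop]
        have hval : (pvAlpha.reverse[k + j]'(by omega)).toNat = 122 - (k + j) := by
          have h1' := hchar ⟨k + j, hkj⟩
          rwa [List.getD_eq_getElem _ _ (by omega)] at h1'
        apply pv_char_eq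
        rw [hrhs, hval]
        interval_cases j <;> simp <;> omega
    have hinf : ∀ m : Fin 23, ((pvAlpha.reverse.drop m.1).take 4) <:+: pvAlpha.reverse := by decide
    rw [hweq]
    exact hinf ⟨k, by omega⟩

-- window chars vs whole-string chars
lemma pv_slice_window {l : List Char} {k : Nat} (hk : k + 4 ≤ l.length) (j : Nat) (hj : j < 4) :
    pvG ((l.drop k).take 4) j = pvG l (k + j) := by
  unfold pvG
  have hlen : ((l.drop k).take 4).length = 4 := by
    simp only [List.length_take, List.length_drop]
    omega
  rw [List.getD_eq_getElem _ _ (by omega)]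
  rw [List.getElem_take, List.getElem_drop]
  exact (List.getD_eq_getElem _ _ (by omega)).symm

lemma pv_window_asc {l : List Char} {k : Nat} (hk : k + 4 ≤ l.length) :
    pvAsc ((l.drop k).take 4) 0 = pvAsc l k := by
  unfold pvAsc
  rw [pv_slice_window hk 0 (by norm_num), pv_slice_window hk (0+1) (by norm_num),
      pv_slice_window hk (0+2) (by norm_num), pv_slice_window hk (0+3) (by norm_num)]
  norm_num

lemma pv_window_desc {l : List Char} {k : Nat} (hk : k + 4 ≤ l.length) :
    pvDesc ((l.drop k).take 4) 0 = pvDesc l k := by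
  unfold pvDesc
  rw [pv_slice_window hk 0 (by norm_num), pv_slice_window hk (0+1) (by norm_num),
      pv_slice_window hk (0+2) (by norm_num), pv_slice_window hk (0+3) (by norm_num)]
  norm_num

-- ===== A-side characterisation =====
lemma pvA_iff (t : String) :
    letter_sequence t = true ↔
      ∃ i : Nat, (pvAsc (PySem.Chars.lower t.toList) i || pvDesc (PySem.Chars.lower t.toList) i) = true := by
  unfold letter_sequence
  dsimp only
  rw [show "abcdefghijklmnopqrstuvwxyz".toList = pvAlpha from rfl]
  rw [show (PySem.List.slice? pvAlpha none none (-1)).getD [] = pvAlpha.reverse from by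
        rw [PySem.List.slice?_none_none_neg_one]; rfl]
  set l := PySem.Chars.lower t.toList with hl
  rw [PySem.List.foldl_if_true_eq]
  simp only [Bool.false_or, List.any_eq_true]
  constructor
  · rintro ⟨i, hmem, hp⟩
    rw [PySem.List.mem_pyRange_one] at hmem
    obtain ⟨hi0, hin⟩ := hmem
    set k := i.toNat with hk
    have hkb : k + 4 ≤ l.length := by omega
    have hsl : PySem.List.slice l (some i) (some (i + 4)) = (l.drop k).take 4 := by
      rw [PySem.List.slice_toNat l hi0 (by omega)]
      congr 1
      omega
    rw [hsl] at hp
    have hlen4 : ((l.drop k).take 4).length = 4 := by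
      simp only [List.length_take, List.length_drop]
      omega
    refine ⟨k, ?_⟩
    rw [Bool.or_eq_true]
    rw [Bool.or_eq_true] at hp
    rcases hp with hp1 | hp1
    · left
      rw [← pv_window_asc hkb]
      exact (pv_isIn_alpha hlen4).mp hp1
    · right
      rw [← pv_window_desc hkb]
      exact (pv_isIn_alphaRev hlen4).mp hp1
  · rintro ⟨k, hw⟩
    have hkb : k + 4 ≤ l.length := pv_win_bound hw
    refine ⟨(k : Int), ?_, ?_⟩
    · rw [PySem.List.mem_pyRange_one]
      omega
    · have hsl : PySem.List.slice l (some (k : Int)) (some ((k : Int) + 4)) = (l.drop k).take 4 := by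
        rw [PySem.List.slice_toNat l (by omega) (by omega)]
        congr 1
        omega
      rw [hsl]
      have hlen4 : ((l.drop k).take 4).length = 4 := by
        simp only [List.length_take, List.length_drop]
        omega
      rw [Bool.or_eq_true]
      rw [Bool.or_eq_true] at hw
      rcases hw with h | h
      · left
        exact (pv_isIn_alpha hlen4).mpr (by rw [pv_window_asc hkb]; exact h)
      · right
        exact (pv_isIn_alphaRev hlen4).mpr (by rw [pv_window_desc hkb]; exact h)

-- ===== B-side characterisation =====
lemma pvAr_pos (l : List Char) (m : Nat) : 1 ≤ pvAr l m := by
  cases m with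
  | zero => simp [pvAr]
  | succ p =>
    show 1 ≤ if pvStep (pvG l p) (pvG l (p+1)) then pvAr l p + 1 else 1
    split_ifs <;> omega

lemma pvDr_pos (l : List Char) (m : Nat) : 1 ≤ pvDr l m := by
  cases m with
  | zero => simp [pvDr]
  | succ p =>
    show 1 ≤ if pvStep (pvG l (p+1)) (pvG l p) then pvDr l p + 1 else 1
    split_ifs <;> omega

lemma pvAr_le (l : List Char) (m : Nat) : pvAr l m ≤ m + 1 := by
  induction m with
  | zero => simp [pvAr]
  | succ p ih =>
    show (if pvStep (pvG l p) (pvG l (p+1)) then pvAr l p + 1 else 1) ≤ p + 2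
    split_ifs <;> omega

lemma pvDr_le (l : List Char) (m : Nat) : pvDr l m ≤ m + 1 := by
  induction m with
  | zero => simp [pvDr]
  | succ p ih =>
    show (if pvStep (pvG l (p+1)) (pvG l p) then pvDr l p + 1 else 1) ≤ p + 2
    split_ifs <;> omega

lemma pvAr_ge4 (l : List Char) (m : Nat) : 4 ≤ pvAr l (m+3) ↔ pvAsc l m = true := by
  have e3 : pvAr l (m+3) = if pvStep (pvG l (m+2)) (pvG l (m+3)) then pvAr l (m+2) + 1 else 1 := rfl
  have e2 : pvAr l (m+2) = if pvStep (pvG l (m+1)) (pvG l (m+2)) then pvAr l (m+1) + 1 else 1 := rfl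
  have e1 : pvAr l (m+1) = if pvStep (pvG l m) (pvG l (m+1)) then pvAr l m + 1 else 1 := rfl
  have hp := pvAr_pos l m
  rw [e3, e2, e1]
  unfold pvAsc
  by_cases h2 : pvStep (pvG l (m+2)) (pvG l (m+3)) = true <;>
    by_cases h1 : pvStep (pvG l (m+1)) (pvG l (m+2)) = true <;>
      by_cases h0 : pvStep (pvG l m) (pvG l (m+1)) = true <;>
        simp [h2, h1, h0] <;> omega

lemma pvDr_ge4 (l : List Char) (m : Nat) : 4 ≤ pvDr l (m+3) ↔ pvDesc l m = true := by
  have e3 : pvDr l (m+3) = if pvStep (pvG l (m+3)) (pvG l (m+2)) then pvDr l (m+2) + 1 else 1 := rfl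
  have e2 : pvDr l (m+2) = if pvStep (pvG l (m+2)) (pvG l (m+1)) then pvDr l (m+1) + 1 else 1 := rfl
  have e1 : pvDr l (m+1) = if pvStep (pvG l (m+1)) (pvG l m) then pvDr l m + 1 else 1 := rfl
  have hp := pvDr_pos l m
  rw [e3, e2, e1]
  unfold pvDesc
  by_cases h2 : pvStep (pvG l (m+3)) (pvG l (m+2)) = true <;>
    by_cases h1 : pvStep (pvG l (m+2)) (pvG l (m+1)) = true <;>
      by_cases h0 : pvStep (pvG l (m+1)) (pvG l m) = true <;>
        simp [h2, h1, h0] <;> omega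

lemma pvGo_inv (l : List Char) (m : Nat) :
    ((pvGo l m).1 = true ↔ ∃ i, i + 3 ≤ m ∧ (pvAsc l i || pvDesc l i) = true)
    ∧ ((pvGo l m).1 = false → pvGo l m = (false, pvAr l m, pvDr l m)) := by
  induction m with
  | zero =>
    have h0 : pvGo l 0 = (false, 1, 1) := rfl
    constructor
    · rw [h0]
      simp only [Bool.false_eq_true, false_iff]
      rintro ⟨i, hi, -⟩
      omega
    · intro _
      rw [h0]
      rfl
  | succ m ih =>
    have hstep : pvGo l (m+1) = pvB l (pvGo l m) (m+1) := by
      unfold pvGo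
      rw [show m + 1 = m + 1 from rfl, List.range'_concat]
      rw [List.foldl_append]
      simp only [List.foldl_cons, List.foldl_nil]
      congr 1
      omega
    by_cases hf : (pvGo l m).1 = true
    · have hb : pvB l (pvGo l m) (m+1) = pvGo l m := by
        unfold pvB
        rw [if_pos hf]
      rw [hstep, hb]
      constructor
      · constructor
        · intro _
          obtain ⟨i, hi, hw⟩ := ih.1.mp hf
          exact ⟨i, by omega, hw⟩
        · intro _
          exact hf
      · intro hcontra
        rw [hf] at hcontra
        exact absurd hcontra (by simp)
    · have hf' : (pvGo l m).1 = false := by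
        cases h : (pvGo l m).1
        · rfl
        · exact absurd h hf
      have htup := ih.2 hf'
      have hnold : ¬ ∃ i, i + 3 ≤ m ∧ (pvAsc l i || pvDesc l i) = true := by
        rw [← ih.1, hf']
        simp
      have hres : pvGo l (m+1) =
          (decide (4 ≤ pvAr l (m+1)) || decide (4 ≤ pvDr l (m+1)), pvAr l (m+1), pvDr l (m+1)) := by
        rw [hstep, htup]
        unfold pvB
        rw [if_neg (by simp)]
        dsimp only
        rw [show m + 1 - 1 = m from rfl]
        rw [pvStep_swap (pvG l m) (pvG l (m+1))]
        have easc : (if pvStep (pvG l m) (pvG l (m+1)) then pvAr l m + 1 else 1) = pvAr l (m+1) := rfl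
        have edesc : (if pvStep (pvG l (m+1)) (pvG l m) then pvDr l m + 1 else 1) = pvDr l (m+1) := rfl
        rw [show ((('a' ≤ pvG l m && pvG l m ≤ 'z') && ('a' ≤ pvG l (m+1) && pvG l (m+1) ≤ 'z')) &&
              ((pvG l (m+1)).toNat == (pvG l m).toNat + 1)) = pvStep (pvG l m) (pvG l (m+1)) from rfl]
        rw [easc, edesc]
      constructor
      · rw [hres]
        simp only [Bool.or_eq_true, decide_eq_true_eq]
        constructor
        · rintro (h4 | h4)
          · have hle := pvAr_le l (m+1)
            have hm2 : 2 ≤ m := by omega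
            have hrw : m - 2 + 3 = m + 1 := by omega
            rw [← hrw] at h4
            have := (pvAr_ge4 l (m-2)).mp h4
            exact ⟨m - 2, by omega, Or.inl this⟩
          · have hle := pvDr_le l (m+1)
            have hm2 : 2 ≤ m := by omega
            have hrw : m - 2 + 3 = m + 1 := by omega
            rw [← hrw] at h4
            have := (pvDr_ge4 l (m-2)).mp h4
            exact ⟨m - 2, by omega, Or.inr this⟩
        · rintro ⟨i, hi, hw⟩
          have hieq : i + 3 = m + 1 := by
            by_contra hne
            exact hnold ⟨i, by omega, by rcases hw with h | h <;> simp [h]⟩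
          rcases hw with h | h
          · left
            have := (pvAr_ge4 l i).mpr h
            rwa [hieq] at this
          · right
            have := (pvDr_ge4 l i).mpr h
            rwa [hieq] at this
      · intro h1
        rw [hres] at h1 ⊢
        have hX : (decide (4 ≤ pvAr l (m+1)) || decide (4 ≤ pvDr l (m+1))) = false := h1
        rw [hX]

lemma pv_pyRange_one (n : Nat) :
    PySem.List.pyRange 1 (n : Int) 1 = (List.range' 1 (n-1)).map (fun k : Nat => (k : Int)) := by
  induction n with
  | zero => rfl
  | succ m ih =>
    cases m with
    | zero => rfl
    | succ p =>
      rw [show ((p + 1 + 1 : Nat) : Int) = ((p + 1 : Nat) : Int) + 1 from by push_cast; ring]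
      rw [PySem.List.pyRange_one_succ_right (by push_cast; omega)]
      rw [ih]
      rw [show (p + 1 + 1) - 1 = (p + 1 - 1) + 1 from by omega]
      rw [List.range'_concat]
      rw [List.map_append]
      simp only [List.map_cons, List.map_nil]
      congr 2
      push_cast
      omega

lemma pvB_iff (t : String) :
    letter_sequence_alt t = true ↔
      ∃ i : Nat, (pvAsc (PySem.Chars.lower t.toList) i || pvDesc (PySem.Chars.lower t.toList) i) = true := by
  unfold letter_sequence_alt
  dsimp only
  set l := PySem.Chars.lower t.toList with hl
  rw [pv_pyRange_one l.length, List.foldl_map]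
  rw [PySem.List.foldl_congr_mem (List.range' 1 (l.length - 1)) _ (pvB l) _ ?hcong]
  · have hinv := pvGo_inv l (l.length - 1)
    unfold pvGo at hinv
    rw [hinv.1]
    constructor
    · rintro ⟨i, _, hw⟩
      exact ⟨i, hw⟩
    · rintro ⟨i, hw⟩
      have := pv_win_bound hw
      exact ⟨i, by omega, hw⟩
  case hcong =>
    intro acc k hk
    have hk1 : 1 ≤ k := by
      have := List.mem_range'_1.mp hk
      omega
    by_cases hacc : acc.1 = true
    · unfold pvB
      rw [if_pos hacc, if_pos hacc]
    · unfold pvB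
      rw [if_neg hacc, if_neg hacc]
      dsimp only
      have e1 : PySem.List.pyGetD l ((k : Int) - 1) ' ' = pvG l (k - 1) := by
        rw [show ((k : Int) - 1) = ((k - 1 : Nat) : Int) from by omega, PySem.List.pyGetD_natCast]
        rfl
      have e2 : PySem.List.pyGetD l (k : Int) ' ' = pvG l k := by
        rw [PySem.List.pyGetD_natCast]
        rfl
      rw [e1, e2]

-- ===== VERDICT (by name: the statement is the Claim_ definition above) =====
theorem letter_sequence_spec : Claim_equal_letter_sequence := by
  intro t _
  unfold Spec_letter_sequence
  have hA := pvA_iff t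
  have hB := pvB_iff t
  cases hA' : letter_sequence t <;> cases hB' : letter_sequence_alt t <;> simp_all
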